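-- pv_equiv track=rewrite | github.com/elice-02-study-01-algorithm/python | HJ_Seo/etc/1020_notcomp.py | num_sum
-- ===== SOURCE A (Python) =====
-- def num_sum(arr):
--     dic = {i:0 for i in range(2,8)}
--     for x in arr:
--         if x == '1':
--             dic[2] += 2
--         elif x == '7':
--             dic[3] += 3
--         elif x == '4':
--             dic[4] += 4
--         elif x in ['2','3','5','9']:
--             dic[5] += 5
--         elif x in ['0','6']:
--             dic[6] += 6
--         elif x == '8':
--             dic[7] += 7
--
--     return sum(dic.values())
-- ===== SOURCE B (Python) =====
-- TABLE = (('1', 2), ('7', 3), ('4', 4), ('2', 5), ('3', 5),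
--          ('5', 5), ('9', 5), ('0', 6), ('6', 6), ('8', 7))
--
-- def num_sum(arr):
--     # Stage 1: frequency count of the elements (no weights involved).
--     counts = {}
--     for x in arr:
--         counts[x] = counts.get(x, 0) + 1
--     # Stage 2: weighted sum over the ten digit entries only.
--     total = 0
--     for d, w in TABLE:
--         total += counts.get(d, 0) * w
--     return total
-- ===== Notes on version B (the rewrite author's own statement) =====
-- stated objective: alternative
-- what changed: Replaced the per-element weighted accumulation into segment buckets by two stages: a frequency counter built over the input, then a weighted sum count*weight over the ten digit entries, so weights are applied per distinct digit instead of per element.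
import Mathlib
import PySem

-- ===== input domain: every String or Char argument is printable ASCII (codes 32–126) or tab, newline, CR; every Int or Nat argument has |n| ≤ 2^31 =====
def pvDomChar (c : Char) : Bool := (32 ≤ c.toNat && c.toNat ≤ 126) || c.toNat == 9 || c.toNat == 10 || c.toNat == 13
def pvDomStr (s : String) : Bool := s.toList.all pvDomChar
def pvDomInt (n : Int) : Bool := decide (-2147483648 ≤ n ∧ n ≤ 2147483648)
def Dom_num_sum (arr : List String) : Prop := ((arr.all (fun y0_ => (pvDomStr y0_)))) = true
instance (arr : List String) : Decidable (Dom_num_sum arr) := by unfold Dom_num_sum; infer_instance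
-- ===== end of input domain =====

-- B restructures A's per-element weighted bucket accumulation into two stages —
-- a frequency counter over the input, then a weighted sum count*weight over the
-- ten digit table entries (objective: alternative, same cost).

-- ===== PORT A =====
def num_sum (arr : List String) : Int :=
  let dic : PySem.Dict Int Int :=
    (PySem.List.pyRange 2 8 1).foldl (fun d i => d.insert i 0) PySem.Dict.empty
  let dic := arr.foldl (fun d x =>
    if x == "1" then d.insert 2 (d.getD 2 0 + 2)
    else if x == "7" then d.insert 3 (d.getD 3 0 + 3)
    else if x == "4" then d.insert 4 (d.getD 4 0 + 4)
    else if ["2","3","5","9"].contains x then d.insert 5 (d.getD 5 0 + 5)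
    else if ["0","6"].contains x then d.insert 6 (d.getD 6 0 + 6)
    else if x == "8" then d.insert 7 (d.getD 7 0 + 7)
    else d) dic
  dic.values.sum

-- ===== PORT B =====
def pvTable : List (String × Int) :=
  [("1",2),("7",3),("4",4),("2",5),("3",5),("5",5),("9",5),("0",6),("6",6),("8",7)]

def num_sum_alt (arr : List String) : Int :=
  let counts : PySem.Dict String Int :=
    arr.foldl (fun c x => c.insert x (c.getD x 0 + 1)) PySem.Dict.empty
  pvTable.foldl (fun total dw => total + counts.getD dw.1 0 * dw.2) 0

-- ===== PRECONDITION & SPEC =====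
def Spec_num_sum (arr : List String) (out : Int) : Prop := out = num_sum_alt arr
instance (arr : List String) (out : Int) : Decidable (Spec_num_sum arr out) := by unfold Spec_num_sum; infer_instance

-- ===== CLAIM (what is proved, stated in full; the proofs are below) =====
def Claim_equal_num_sum : Prop := ∀ (arr : List String), Dom_num_sum arr → Spec_num_sum arr (num_sum arr)

-- ===== LEMMAS AND PROOFS =====

-- The common yardstick: the weight A's chain (and B's table) assigns to one element.
def pvWt (x : String) : Int :=
  if x = "1" then 2 else if x = "7" then 3 else if x = "4" then 4
  else if x = "2" ∨ x = "3" ∨ x = "5" ∨ x = "9" then 5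
  else if x = "0" ∨ x = "6" then 6 else if x = "8" then 7 else 0

-- The weighted sum over the table of a given counter dict.
def pvTableSum (c : PySem.Dict String Int) : Int :=
  pvTable.foldl (fun total dw => total + c.getD dw.1 0 * dw.2) 0

-- A's loop invariant: folding A's step over a bucket dict with keys 2..7 adds
-- exactly the per-element weights to the sum of the bucket values.
theorem num_sum_loop (arr : List String) (a b c d e f : Int) :
    (arr.foldl (fun d x =>
      if x == "1" then d.insert 2 (d.getD 2 0 + 2)
      else if x == "7" then d.insert 3 (d.getD 3 0 + 3)
      else if x == "4" then d.insert 4 (d.getD 4 0 + 4)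
      else if ["2","3","5","9"].contains x then d.insert 5 (d.getD 5 0 + 5)
      else if ["0","6"].contains x then d.insert 6 (d.getD 6 0 + 6)
      else if x == "8" then d.insert 7 (d.getD 7 0 + 7)
      else d)
      (PySem.Dict.mk [((2:Int),a),(3,b),(4,c),(5,d),(6,e),(7,f)])).values.sum
    = a + b + c + d + e + f + (arr.map pvWt).sum := by
  induction arr generalizing a b c d e f with
  | nil => simp [PySem.Dict.values]; ring
  | cons x xs ih =>
    rw [List.map_cons, List.sum_cons]
    by_cases h1 : x = "1"
    · subst h1
      show (xs.foldl _ (PySem.Dict.mk [(2, a + 2),(3,b),(4,c),(5,d),(6,e),(7,f)])).values.sum = _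
      rw [ih, show pvWt "1" = 2 from by decide]; ring
    · by_cases h7 : x = "7"
      · subst h7
        show (xs.foldl _ (PySem.Dict.mk [(2,a),(3,b + 3),(4,c),(5,d),(6,e),(7,f)])).values.sum = _
        rw [ih, show pvWt "7" = 3 from by decide]; ring
      · by_cases h4 : x = "4"
        · subst h4
          show (xs.foldl _ (PySem.Dict.mk [(2,a),(3,b),(4,c + 4),(5,d),(6,e),(7,f)])).values.sum = _
          rw [ih, show pvWt "4" = 4 from by decide]; ring
        · by_cases h5 : x = "2" ∨ x = "3" ∨ x = "5" ∨ x = "9"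
          · rcases h5 with h | h | h | h <;> subst h <;>
              · show (xs.foldl _ (PySem.Dict.mk [(2,a),(3,b),(4,c),(5,d + 5),(6,e),(7,f)])).values.sum = _
                rw [ih, show pvWt _ = 5 from by decide]; ring
          · by_cases h6 : x = "0" ∨ x = "6"
            · rcases h6 with h | h <;> subst h <;>
                · show (xs.foldl _ (PySem.Dict.mk [(2,a),(3,b),(4,c),(5,d),(6,e + 6),(7,f)])).values.sum = _
                  rw [ih, show pvWt _ = 6 from by decide]; ring
            · by_cases h8 : x = "8"
              · subst h8
                show (xs.foldl _ (PySem.Dict.mk [(2,a),(3,b),(4,c),(5,d),(6,e),(7,f + 7)])).values.sum = _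
                rw [ih, show pvWt "8" = 7 from by decide]; ring
              · push Not at h5 h6
                obtain ⟨h2, h3, h55, h9⟩ := h5
                obtain ⟨h0, h66⟩ := h6
                rw [List.foldl_cons,
                  if_neg (by simp [h1]), if_neg (by simp [h7]), if_neg (by simp [h4]),
                  if_neg (by simp [h2, h3, h55, h9]), if_neg (by simp [h0, h66]),
                  if_neg (by simp [h8]), ih]
                rw [show pvWt x = 0 from by
                  simp [pvWt, h1, h7, h4, h2, h3, h55, h9, h0, h66, h8]]
                ring

-- One counter update shifts the table sum by exactly the element's weight.
theorem pvTableSum_insert (c : PySem.Dict String Int) (x : String) :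
    pvTableSum (c.insert x (c.getD x 0 + 1)) = pvTableSum c + pvWt x := by
  simp only [pvTableSum, pvTable, List.foldl, PySem.Dict.getD_insert]
  by_cases h1 : x = "1"
  · subst h1; simp [pvWt]; ring
  · by_cases h7 : x = "7"
    · subst h7; simp [pvWt]; ring
    · by_cases h4 : x = "4"
      · subst h4; simp [pvWt]; ring
      · by_cases h2 : x = "2"
        · subst h2; simp [pvWt]; ring
        · by_cases h3 : x = "3"
          · subst h3; simp [pvWt]; ring
          · by_cases h55 : x = "5"
            · subst h55; simp [pvWt]; ring
            · by_cases h9 : x = "9"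
              · subst h9; simp [pvWt]; ring
              · by_cases h0 : x = "0"
                · subst h0; simp [pvWt]; ring
                · by_cases h6 : x = "6"
                  · subst h6; simp [pvWt]; ring
                  · by_cases h8 : x = "8"
                    · subst h8; simp [pvWt]; ring
                    · simp [pvWt, h1, h7, h4, h2, h3, h55, h9, h0, h6, h8,
                        Ne.symm h1, Ne.symm h7, Ne.symm h4, Ne.symm h2, Ne.symm h3,
                        Ne.symm h55, Ne.symm h9, Ne.symm h0, Ne.symm h6, Ne.symm h8]

-- B's loop invariant: the table sum of the counter after the counting pass.
theorem pvTableSum_fold (arr : List String) (c : PySem.Dict String Int) :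
    pvTableSum (arr.foldl (fun c x => c.insert x (c.getD x 0 + 1)) c)
      = pvTableSum c + (arr.map pvWt).sum := by
  induction arr generalizing c with
  | nil => simp
  | cons x xs ih =>
    rw [List.foldl_cons, ih, pvTableSum_insert, List.map_cons, List.sum_cons]; ring

-- ===== VERDICT (by name: the statement is the Claim_ definition above) =====
theorem num_sum_spec : Claim_equal_num_sum := by
  intro arr _
  have hinit : ((PySem.List.pyRange 2 8 1).foldl (fun d i => PySem.Dict.insert d i (0:Int))
      PySem.Dict.empty) = PySem.Dict.mk [((2:Int),(0:Int)),(3,0),(4,0),(5,0),(6,0),(7,0)] := by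
    decide
  show (arr.foldl _ ((PySem.List.pyRange 2 8 1).foldl (fun d i => PySem.Dict.insert d i (0:Int))
      PySem.Dict.empty)).values.sum = num_sum_alt arr
  rw [hinit]
  refine (num_sum_loop arr 0 0 0 0 0 0).trans ?_
  show _ = pvTableSum (arr.foldl (fun c x => c.insert x (c.getD x 0 + 1)) PySem.Dict.empty)
  rw [pvTableSum_fold]
  simp [pvTableSum, pvTable]
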